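-- pv_equiv track=rewrite | github.com/aorursy/new-nb-1 | akishen74_ctr-practice.py | tran_hour
-- ===== SOURCE A (Python) =====
-- def tran_hour(x):
--     x = x % 100
--     while x in [23,0]:
--         return '23-01'
--     while x in [1,2]:
--         return '01-03'
--     while x in [3,4]:
--         return '03-05'
--     while x in [5,6]:
--         return '05-07'
--     while x in [7,8]:
--         return '07-09'
--     while x in [9,10]:
--         return '09-11'
--     while x in [11,12]:
--         return '11-13'
--     while x in [13,14]:
--         return '13-15'
--     while x in [15,16]:
--         return '15-17'
--     while x in [17,18]:
--         return '17-19'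
--     while x in [19,20]:
--         return '19-21'
--     while x in [21,22]:
--         return '21-23'
-- ===== SOURCE B (Python) =====
-- def tran_hour(x):
--     h = x % 100
--     if h > 23:
--         return None
--     start = (h if h % 2 == 1 else h - 1) % 24
--     end = (start + 2) % 24
--     return f"{start:02d}-{end:02d}"
-- ===== Notes on version B (the rewrite author's own statement) =====
-- stated objective: simpler
-- what changed: Replaces the chain of twelve membership checks with a closed-form arithmetic computation of the bucket start/end and zero-padded formatting.
import Mathlib
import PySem

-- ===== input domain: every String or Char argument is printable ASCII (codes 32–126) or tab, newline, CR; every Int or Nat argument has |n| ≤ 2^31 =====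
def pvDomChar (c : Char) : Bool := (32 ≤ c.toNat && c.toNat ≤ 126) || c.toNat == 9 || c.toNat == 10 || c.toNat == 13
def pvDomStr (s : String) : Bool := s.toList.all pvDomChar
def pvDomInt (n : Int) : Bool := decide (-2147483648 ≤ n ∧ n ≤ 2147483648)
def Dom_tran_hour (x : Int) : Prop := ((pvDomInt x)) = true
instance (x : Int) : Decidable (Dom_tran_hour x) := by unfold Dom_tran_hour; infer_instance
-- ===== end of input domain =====

-- B replaces A's chain of twelve membership checks by a closed-form arithmetic bucket computation (objective: simpler).


-- ===== PORT A =====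
-- each 'while x in [...]: return ...' is a single membership test with a return
def tranHourBodyA (x : Int) : Option String :=
  if x = 23 ∨ x = 0 then some "23-01"
  else if x = 1 ∨ x = 2 then some "01-03"
  else if x = 3 ∨ x = 4 then some "03-05"
  else if x = 5 ∨ x = 6 then some "05-07"
  else if x = 7 ∨ x = 8 then some "07-09"
  else if x = 9 ∨ x = 10 then some "09-11"
  else if x = 11 ∨ x = 12 then some "11-13"
  else if x = 13 ∨ x = 14 then some "13-15"
  else if x = 15 ∨ x = 16 then some "15-17"
  else if x = 17 ∨ x = 18 then some "17-19"
  else if x = 19 ∨ x = 20 then some "19-21"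
  else if x = 21 ∨ x = 22 then some "21-23"
  else none

def tran_hour (x : Int) : Option String :=
  tranHourBodyA (PySem.Int.mod x 100)

-- ===== PORT B =====
-- f"{n:02d}" for 0 ≤ n < 100
def tranHourPad2 (n : Int) : String :=
  if n < 10 then "0" ++ PySem.Int.toStr n else PySem.Int.toStr n

def tranHourBodyB (h : Int) : Option String :=
  if h > 23 then none
  else
    let start := PySem.Int.mod (if PySem.Int.mod h 2 = 1 then h else h - 1) 24
    let «end» := PySem.Int.mod (start + 2) 24
    some (tranHourPad2 start ++ "-" ++ tranHourPad2 «end»)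

def tran_hour_alt (x : Int) : Option String :=
  tranHourBodyB (PySem.Int.mod x 100)

-- ===== PRECONDITION & SPEC =====
def Spec_tran_hour (x : Int) (out : Option String) : Prop := out = tran_hour_alt x
instance (x : Int) (out : Option String) : Decidable (Spec_tran_hour x out) := by unfold Spec_tran_hour; infer_instance

-- ===== CLAIM (what is proved, stated in full; the proofs are below) =====
def Claim_equal_tran_hour : Prop := ∀ (x : Int), Dom_tran_hour x → Spec_tran_hour x (tran_hour x)

-- ===== LEMMAS AND PROOFS =====
theorem tranHourBody_eq : ∀ n : Fin 100, tranHourBodyA (n : Int) = tranHourBodyB (n : Int) := by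
  decide

theorem tranHourBody_eq_int (h : Int) (h0 : 0 ≤ h) (h1 : h < 100) :
    tranHourBodyA h = tranHourBodyB h := by
  have : h = ((⟨h.toNat, by omega⟩ : Fin 100) : Int) := by simp; omega
  rw [this]
  exact tranHourBody_eq _

-- ===== VERDICT (by name: the statement is the Claim_ definition above) =====
theorem tran_hour_spec : Claim_equal_tran_hour := by
  intro x _
  unfold Spec_tran_hour tran_hour tran_hour_alt
  have h0 : 0 ≤ PySem.Int.mod x 100 := by
    simp [PySem.Int.mod, Int.fmod_eq_emod]; omega
  have h1 : PySem.Int.mod x 100 < 100 := by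
    simp [PySem.Int.mod, Int.fmod_eq_emod]; omega
  exact tranHourBody_eq_int _ h0 h1
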